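-- pv_equiv track=rewrite | github.com/cybertronai/ByteDMD-definition | docs/manhattan_function_figure.py | lower_half_spiral
-- ===== SOURCE A (Python) =====
-- import math
--
-- def isqrt_ceil(x: int) -> int:
--     if x <= 0:
--         return 0
--     return math.isqrt(x - 1) + 1
--
-- def lower_half_spiral(n: int):
--     """Scratch spiral: depths 1..n packed below the origin (y<0)."""
--     for i in range(1, n + 1):
--         k = isqrt_ceil(i)
--         start_i = (k - 1) ** 2 + 1
--         idx = i - start_i
--         if k % 2 == 1:
--             x = -(k - 1) + idx
--         else:
--             x = (k - 1) - idx
--         y = -(k - abs(x))           # scratch below (y<0)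
--         yield x, y
-- ===== SOURCE B (Python) =====
-- def lower_half_spiral(n: int):
--     """Scratch spiral: depths 1..n packed below the origin (y<0)."""
--     count = 0
--     k = 1
--     while count < n:
--         xs = range(-(k - 1), k) if k % 2 == 1 else range(k - 1, -k, -1)
--         for x in xs:
--             yield x, -(k - abs(x))
--             count += 1
--             if count == n:
--                 return
--         k += 1
-- ===== Notes on version B (the rewrite author's own statement) =====
-- stated objective: faster
-- what changed: A computes each point independently from its index via an integer ceiling square root locating its layer; B never takes a square root: it walks successive layers, emitting each layer's whole x-sweep (direction by parity) and stopping mid-layer once n points have been emitted.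
import Mathlib
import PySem

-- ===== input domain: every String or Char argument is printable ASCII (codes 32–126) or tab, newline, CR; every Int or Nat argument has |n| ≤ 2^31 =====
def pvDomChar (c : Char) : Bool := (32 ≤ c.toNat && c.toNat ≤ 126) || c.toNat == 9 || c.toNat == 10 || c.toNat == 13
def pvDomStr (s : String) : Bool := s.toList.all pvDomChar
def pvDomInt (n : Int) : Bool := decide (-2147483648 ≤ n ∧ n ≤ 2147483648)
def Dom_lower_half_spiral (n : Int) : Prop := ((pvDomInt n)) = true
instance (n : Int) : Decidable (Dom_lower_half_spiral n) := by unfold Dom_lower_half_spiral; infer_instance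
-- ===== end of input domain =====

-- B replaces A's per-index closed form (isqrt to find the layer of each index) by a nested
-- walk over whole layers with a remaining-count cutoff; objective: alternative decomposition.


-- ===== PORT A =====
-- math.isqrt on a nonnegative int is exactly Nat.sqrt (floor square root)
def isqrt_ceil (x : Int) : Int :=
  if x ≤ 0 then 0 else (Nat.sqrt (x - 1).toNat : Int) + 1

-- the loop body of A for index i (the generator yields these for i = 1..n)
def pvPointA (i : Int) : Int × Int :=
  let k := isqrt_ceil i
  let start_i := (k - 1) ^ 2 + 1
  let idx := i - start_i
  let x := if k % 2 == 1 then -(k - 1) + idx else (k - 1) - idx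
  (x, -(k - |x|))

def lower_half_spiral (n : Int) : List (Int × Int) :=
  (PySem.List.pyRange 1 (n + 1) 1).map pvPointA

-- ===== PORT B =====
-- the x-sweep of layer k: range(-(k-1), k) for odd k, range(k-1, -k, -1) for even k
def pvLayerB (k : Int) : List Int :=
  if k % 2 == 1 then PySem.List.pyRange (-(k - 1)) k 1
  else PySem.List.pyRange (k - 1) (-k) (-1)

theorem pvLayerB_len (j : Nat) : (pvLayerB ((j : Int) + 1)).length = 2 * j + 1 := by
  unfold pvLayerB
  split <;>
    simp [PySem.List.length_pyRange_one, PySem.List.length_pyRange_neg_one] <;> omega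

-- the while-loop: layer index is j+1, r = points still to emit; cut the last layer at r
def pvGoB (j : Nat) : Nat → List (Int × Int)
  | 0 => []
  | (r + 1) =>
    let k : Int := (j : Int) + 1
    let pts := (pvLayerB k).map (fun x => (x, -(k - |x|)))
    if pts.length ≤ r + 1 then pts ++ pvGoB (j + 1) (r + 1 - pts.length)
    else pts.take (r + 1)
  termination_by r => r
  decreasing_by
    simp only [pts, List.length_map, pvLayerB_len] at *
    omega

def lower_half_spiral_alt (n : Int) : List (Int × Int) := pvGoB 0 n.toNat

-- ===== PRECONDITION & SPEC =====
def Spec_lower_half_spiral (n : Int) (out : List (Int × Int)) : Prop := out = lower_half_spiral_alt n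
instance (n : Int) (out : List (Int × Int)) : Decidable (Spec_lower_half_spiral n out) := by unfold Spec_lower_half_spiral; infer_instance

-- ===== CLAIM (what is proved, stated in full; the proofs are below) =====
def Claim_equal_lower_half_spiral : Prop := ∀ (n : Int), Dom_lower_half_spiral n → Spec_lower_half_spiral n (lower_half_spiral n)

-- ===== LEMMAS AND PROOFS =====

-- the layer of index i: (j)^2 < i ≤ (j+1)^2 → isqrt_ceil i = j+1
theorem pv_isqrt_layer (j : Nat) (i : Int) (h1 : (j : Int) ^ 2 < i) (h2 : i ≤ ((j : Int) + 1) ^ 2) :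
    isqrt_ceil i = (j : Int) + 1 := by
  have hi : 1 ≤ i := by nlinarith [sq_nonneg (j : Int)]
  unfold isqrt_ceil
  rw [if_neg (by omega)]
  have hm : j * j ≤ (i - 1).toNat ∧ (i - 1).toNat < (j + 1) ^ 2 := by
    constructor <;>
      · zify [Int.toNat_of_nonneg (by omega : (0:Int) ≤ i - 1)]
        nlinarith
  have hsq : Nat.sqrt (i - 1).toNat = j := by
    have h1' := Nat.le_sqrt.mpr hm.1
    have h2' := Nat.sqrt_lt'.mpr hm.2
    omega
  rw [hsq]

-- A's points over one full layer equal B's layer sweep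
theorem pv_full_layer (j : Nat) :
    (PySem.List.pyRange (((j : Int) + 1 - 1) ^ 2 + 1) (((j : Int) + 1) ^ 2 + 1) 1).map pvPointA
      = (pvLayerB ((j : Int) + 1)).map (fun x => (x, -(((j : Int) + 1) - |x|))) := by
  set k : Int := (j : Int) + 1 with hk
  have hpoint : ∀ t : Nat, t < 2 * j + 1 →
      pvPointA ((k - 1) ^ 2 + 1 + (t : Int)) =
        (if k % 2 == 1 then -(k - 1) + (t : Int) else (k - 1) - (t : Int),
          -(k - |if k % 2 == 1 then -(k - 1) + (t : Int) else (k - 1) - (t : Int)|)) := by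
    intro t ht
    have hiso : isqrt_ceil ((k - 1) ^ 2 + 1 + (t : Int)) = k := by
      apply pv_isqrt_layer j
      · have : ((j : Int)) ^ 2 = (k - 1) ^ 2 := by rw [hk]; ring_nf
        omega
      · have : ((j : Int) + 1) ^ 2 = (k - 1) ^ 2 + 2 * (j : Int) + 1 := by rw [hk]; ring
        omega
    simp only [pvPointA, hiso]
    ring_nf
  unfold pvLayerB
  rw [PySem.List.pyRange_one]
  have hlen : (k ^ 2 + 1 - ((k - 1) ^ 2 + 1)).toNat = 2 * j + 1 := by
    have : k ^ 2 + 1 - ((k - 1) ^ 2 + 1) = 2 * (j : Int) + 1 := by rw [hk]; ring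
    omega
  rw [hlen]
  split
  · -- odd layer: left-to-right
    rw [PySem.List.pyRange_one]
    have : (k - -(k - 1)).toNat = 2 * j + 1 := by omega
    rw [this, List.map_map, List.map_map]
    apply List.map_congr_left
    intro t ht
    rw [List.mem_range] at ht
    simp only [Function.comp_apply]
    rw [hpoint t ht]
    have h' : ((j : Int) + 1) % 2 = 1 := by simpa [hk] using ‹(k % 2 == 1) = true›
    simp [hk, h']
  · -- even layer: right-to-left
    rw [PySem.List.pyRange_neg_one]
    have : ((k - 1) - -k).toNat = 2 * j + 1 := by omega
    rw [this, List.map_map, List.map_map]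
    apply List.map_congr_left
    intro t ht
    rw [List.mem_range] at ht
    simp only [Function.comp_apply]
    rw [hpoint t ht]
    have h' : ¬ ((j : Int) + 1) % 2 = 1 := by simpa [hk] using ‹¬ (k % 2 == 1) = true›
    simp [hk, h']

-- B's remaining loop from layer j+1 emits exactly A's points for the next r indices
theorem pv_goB_eq (r : Nat) : ∀ (j : Nat),
    pvGoB j r = (PySem.List.pyRange ((j : Int) ^ 2 + 1) ((j : Int) ^ 2 + 1 + (r : Int)) 1).map pvPointA := by
  induction r using Nat.strong_induction_on with
  | _ r ih =>
    intro j
    match r with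
    | 0 => simp [pvGoB, PySem.List.pyRange_one_eq_nil]
    | (r + 1) =>
      rw [pvGoB]
      simp only [List.length_map, pvLayerB_len]
      have hfull := pv_full_layer j
      have hs : ((j : Int) + 1 - 1) ^ 2 + 1 = (j : Int) ^ 2 + 1 := by ring
      rw [hs] at hfull
      split
      · -- full layer fits: emit it, recurse into layer j+2
        rename_i hle
        rw [ih (r + 1 - (2 * j + 1)) (by omega) (j + 1), ← hfull]
        rw [← List.map_append]
        congr 1
        have hle' : (2 * (j : Int) + 1) ≤ (r : Int) + 1 := by exact_mod_cast hle
        have hr : ((r + 1 - (2 * j + 1) : Nat) : Int) = (r : Int) + 1 - (2 * (j : Int) + 1) := by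
          push_cast; omega
        have hj : (((j + 1 : Nat)) : Int) = (j : Int) + 1 := by push_cast; ring
        rw [hj, hr]
        have he : ((j : Int) + 1) ^ 2 + 1 + ((r : Int) + 1 - (2 * (j : Int) + 1))
            = (j : Int) ^ 2 + 1 + ((r + 1 : Nat) : Int) := by push_cast; ring
        rw [he]
        exact (PySem.List.pyRange_one_append _ (((j : Int) + 1) ^ 2 + 1) _
          (by nlinarith [sq_nonneg (j : Int)]) (by push_cast; nlinarith)).symm
      · -- partial layer: take the first r+1 points of it
        rename_i hgt
        rw [← hfull]
        rw [PySem.List.pyRange_one_append ((j : Int) ^ 2 + 1) ((j : Int) ^ 2 + 1 + ((r : Nat) + 1 : Int))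
          (((j : Int) + 1) ^ 2 + 1) (by omega) (by nlinarith [sq_nonneg (j:Int)])]
        rw [List.map_append, List.take_left']
        · push_cast; ring_nf
        · simp [PySem.List.length_pyRange_one]

-- ===== VERDICT (by name: the statement is the Claim_ definition above) =====
theorem lower_half_spiral_spec : Claim_equal_lower_half_spiral := by
  intro n _
  unfold Spec_lower_half_spiral lower_half_spiral lower_half_spiral_alt
  rw [pv_goB_eq n.toNat 0]
  by_cases h : 0 ≤ n
  · congr 2
    push_cast
    omega
  · rw [PySem.List.pyRange_one_eq_nil (by omega), PySem.List.pyRange_one_eq_nil (by omega)]
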